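-- pv_equiv track=rewrite | github.com/olzlgur/baekjoon-practice | test11/3.py | solution
-- ===== SOURCE A (Python) =====
-- def solution(S, C):
--     # Implement your solution here
--     N = len(C)
--     left, right = 0, 1
--     answer = 0
--
--     if N == 1:
--         return answer
--
--     while right < N:
--         if S[left] == S[right]:
--             if C[left] < C[right]:
--                 answer += C[left]
--                 left = right
--                 right +=1
--             else:
--                 answer += C[right]
--                 right += 1
--         else:
--             left = right
--             right += 1
--
--
--     return answer
-- ===== SOURCE B (Python) =====
-- def solution(S, C):
--     n = len(C)
--     if n <= 1:
--         return 0
--     # split the costs into maximal runs of consecutive equal characters of S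
--     runs = [[C[0]]]
--     for i in range(1, n):
--         if S[i] == S[i - 1]:
--             runs[-1].append(C[i])
--         else:
--             runs.append([C[i]])
--     # in each run every character but the most expensive one must be removed
--     return sum(sum(r) - max(r) for r in runs)
-- ===== Notes on version B (the rewrite author's own statement) =====
-- stated objective: simpler
-- what changed: B builds the maximal runs of consecutive equal characters first and computes sum(run)-max(run) per run, instead of A's incremental two-pointer bookkeeping that tracks the index of the current run maximum.
import Mathlib
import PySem

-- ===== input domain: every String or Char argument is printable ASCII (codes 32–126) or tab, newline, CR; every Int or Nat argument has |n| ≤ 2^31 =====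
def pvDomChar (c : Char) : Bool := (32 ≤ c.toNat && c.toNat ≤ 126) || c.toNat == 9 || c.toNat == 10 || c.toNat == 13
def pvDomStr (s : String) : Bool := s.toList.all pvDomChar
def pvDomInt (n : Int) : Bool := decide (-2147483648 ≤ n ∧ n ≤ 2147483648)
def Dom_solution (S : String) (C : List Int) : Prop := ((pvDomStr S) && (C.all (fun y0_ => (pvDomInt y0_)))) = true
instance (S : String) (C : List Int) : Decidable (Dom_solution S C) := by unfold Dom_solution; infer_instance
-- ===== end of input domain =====

-- B replaces A's incremental two-pointer bookkeeping by building maximal runs of equal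
-- consecutive characters and summing sum(run)-max(run) per run (objective: simpler).


-- ===== PORT A =====
-- A's while loop; S[i]/C[i] are ported with pyGetD (exact on in-range indices, which
-- Pre_solution guarantees).
-- `fuel` (initially N ≥ number of remaining iterations) only makes the recursion
-- structural; the loop guard is still `right < n`, exactly as in A.
def aLoop (s : List Char) (c : List Int) (n : Nat) : Nat → Nat → Nat → Int → Int
  | 0, _, _, answer => answer
  | fuel + 1, left, right, answer =>
    if right < n then
      if PySem.List.pyGetD s (left : Int) ' ' == PySem.List.pyGetD s (right : Int) ' ' then
        if PySem.List.pyGetD c (left : Int) 0 < PySem.List.pyGetD c (right : Int) 0 then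
          aLoop s c n fuel right (right + 1) (answer + PySem.List.pyGetD c (left : Int) 0)
        else
          aLoop s c n fuel left (right + 1) (answer + PySem.List.pyGetD c (right : Int) 0)
      else
        aLoop s c n fuel right (right + 1) answer
    else answer

def solution (S : String) (C : List Int) : Int :=
  let N := C.length
  if N = 1 then 0
  else aLoop S.toList C N N 0 1 0

-- ===== PORT B =====
-- B's run-building loop: `cur` is the current run (runs[-1]), `done` the closed runs.
-- `fuel` only makes the recursion structural; the loop guard is still `i < n` as in B.
def bLoop (s : List Char) (c : List Int) (n : Nat) : Nat → Nat → List Int → List (List Int) → List (List Int)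
  | 0, _, cur, done => done ++ [cur]
  | fuel + 1, i, cur, done =>
    if i < n then
      if PySem.List.pyGetD s (i : Int) ' ' == PySem.List.pyGetD s ((i : Int) - 1) ' ' then
        bLoop s c n fuel (i + 1) (cur ++ [PySem.List.pyGetD c (i : Int) 0]) done
      else
        bLoop s c n fuel (i + 1) [PySem.List.pyGetD c (i : Int) 0] (done ++ [cur])
    else done ++ [cur]

def solution_alt (S : String) (C : List Int) : Int :=
  let n := C.length
  if n ≤ 1 then 0
  else
    let runs := bLoop S.toList C n n 1 [PySem.List.pyGetD C 0 0] []
    (runs.map (fun r => r.sum - (PySem.List.max? r (fun x => x)).getD 0)).sum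

-- ===== PRECONDITION & SPEC =====
-- Pre_ excludes exactly the inputs where A raises IndexError: it indexes S at 0..len(C)-1
-- whenever len(C) ≥ 2, so S must then be at least as long as C.
def Pre_solution (S : String) (C : List Int) : Prop :=
  C.length ≤ 1 ∨ C.length ≤ S.length
instance (S : String) (C : List Int) : Decidable (Pre_solution S C) := by
  unfold Pre_solution; infer_instance

def pvWitness_solution : String × List Int := ("ab", [1, 2])

def Spec_solution (S : String) (C : List Int) (out : Int) : Prop := out = solution_alt S C
instance (S : String) (C : List Int) (out : Int) : Decidable (Spec_solution S C out) := by
  unfold Spec_solution; infer_instance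

-- ===== CLAIM (what is proved, stated in full; the proofs are below) =====
def Claim_equal_solution : Prop :=
  ∀ (S : String) (C : List Int), Dom_solution S C → Pre_solution S C →
    Spec_solution S C (solution S C)

-- ===== LEMMAS AND PROOFS =====

-- Reference loop: A's loop with `m` in place of C[left] (the cost of the current run's
-- maximum), comparing s[i-1] with s[i].
def fLoop (s : List Char) (c : List Int) (n : Nat) : Nat → Nat → Int → Int → Int
  | 0, _, _, acc => acc
  | fuel + 1, i, m, acc =>
    if i < n then
      if PySem.List.pyGetD s ((i : Int) - 1) ' ' == PySem.List.pyGetD s (i : Int) ' ' then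
        if m < PySem.List.pyGetD c (i : Int) 0 then
          fLoop s c n fuel (i + 1) (PySem.List.pyGetD c (i : Int) 0) (acc + m)
        else
          fLoop s c n fuel (i + 1) m (acc + PySem.List.pyGetD c (i : Int) 0)
      else
        fLoop s c n fuel (i + 1) (PySem.List.pyGetD c (i : Int) 0) acc
    else acc

def bAns (runs : List (List Int)) : Int :=
  (runs.map (fun r => r.sum - (PySem.List.max? r (fun x => x)).getD 0)).sum

theorem pymax_cons (x : Int) (t : List Int) :
    (PySem.List.max? (x :: t) (fun y => y)).getD 0 = t.foldl max x := by
  rw [PySem.List.max?_id_cons]; rfl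

theorem aLoop_eq_fLoop (s : List Char) (c : List Int) (n : Nat) :
    ∀ (fuel left right : Nat) (answer : Int), 1 ≤ right →
    PySem.List.pyGetD s (left : Int) ' ' = PySem.List.pyGetD s ((right : Int) - 1) ' ' →
    aLoop s c n fuel left right answer
      = fLoop s c n fuel right (PySem.List.pyGetD c (left : Int) 0) answer := by
  intro fuel
  induction fuel with
  | zero => intro left right answer _ _; rfl
  | succ k ih =>
    intro left right answer hr hinv
    have hcast : ((right + 1 : Nat) : Int) - 1 = (right : Int) := by push_cast; ring
    show (if right < n then _ else _) = (if right < n then _ else _)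
    by_cases h : right < n
    · rw [if_pos h, if_pos h]
      rw [← hinv]
      by_cases hc : PySem.List.pyGetD s (left : Int) ' ' == PySem.List.pyGetD s (right : Int) ' '
      · rw [if_pos hc, if_pos hc]
        by_cases hlt : PySem.List.pyGetD c (left : Int) 0 < PySem.List.pyGetD c (right : Int) 0
        · rw [if_pos hlt, if_pos hlt]
          exact ih right (right + 1) _ (by omega) (by rw [hcast])
        · rw [if_neg hlt, if_neg hlt]
          refine ih left (right + 1) _ (by omega) ?_
          rw [hcast]
          exact eq_of_beq hc
      · rw [if_neg hc, if_neg hc]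
        exact ih right (right + 1) _ (by omega) (by rw [hcast])
    · rw [if_neg h, if_neg h]

theorem fLoop_eq_bAns (s : List Char) (c : List Int) (n : Nat) :
    ∀ (fuel i : Nat) (x : Int) (t : List Int) (done : List (List Int)), 1 ≤ i →
    fLoop s c n fuel i (t.foldl max x) (bAns done + (x :: t).sum - t.foldl max x)
      = bAns (bLoop s c n fuel i (x :: t) done) := by
  intro fuel
  induction fuel with
  | zero =>
    intro i x t done _
    show _ = bAns (done ++ [x :: t])
    simp [fLoop, bAns, pymax_cons]
    ring
  | succ k ih =>
    intro i x t done hi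
    show (if i < n then _ else _) = bAns (if i < n then _ else _)
    by_cases h : i < n
    · rw [if_pos h, if_pos h]
      have hcomm : (PySem.List.pyGetD s ((i : Int) - 1) ' ' == PySem.List.pyGetD s (i : Int) ' ')
          = (PySem.List.pyGetD s (i : Int) ' ' == PySem.List.pyGetD s ((i : Int) - 1) ' ') := by
        by_cases hq : PySem.List.pyGetD s ((i : Int) - 1) ' ' = PySem.List.pyGetD s (i : Int) ' '
        · rw [hq]
        · rw [beq_eq_false_iff_ne.mpr hq, beq_eq_false_iff_ne.mpr (Ne.symm hq)]
      rw [hcomm]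
      by_cases hc : (PySem.List.pyGetD s (i : Int) ' ' == PySem.List.pyGetD s ((i : Int) - 1) ' ') = true
      · rw [if_pos hc, if_pos hc]
        set ci := PySem.List.pyGetD c (i : Int) 0 with hci
        by_cases hlt : t.foldl max x < ci
        · rw [if_pos hlt]
          have hmax : (t ++ [ci]).foldl max x = ci := by
            rw [List.foldl_append]; simp [max_eq_right (le_of_lt hlt)]
          have := ih (i + 1) x (t ++ [ci]) done (by omega)
          rw [hmax] at this
          rw [List.cons_append, ← this]
          congr 1
          simp [List.sum_append]
          ring
        · rw [if_neg hlt]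
          have hmax : (t ++ [ci]).foldl max x = t.foldl max x := by
            rw [List.foldl_append]; simp [max_eq_left (Int.not_lt.mp hlt)]
          have := ih (i + 1) x (t ++ [ci]) done (by omega)
          rw [hmax] at this
          rw [List.cons_append, ← this]
          congr 1
          simp [List.sum_append]
          ring
      · rw [if_neg hc, if_neg hc]
        set ci := PySem.List.pyGetD c (i : Int) 0 with hci
        have := ih (i + 1) ci [] (done ++ [x :: t]) (by omega)
        simp only [List.foldl_nil] at this
        rw [← this]
        congr 1
        simp [bAns, List.map_append, List.sum_append, pymax_cons]
        ring
    · rw [if_neg h, if_neg h]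
      simp [bAns, pymax_cons]
      ring

-- ===== VERDICT (by name: the statement is the Claim_ definition above) =====
theorem solution_spec : Claim_equal_solution := by
  intro S C _ _
  unfold Spec_solution solution solution_alt
  by_cases h1 : C.length = 1
  · simp [h1]
  · simp only [h1, if_neg, not_false_iff]
    by_cases h0 : C.length ≤ 1
    · have hz : C.length = 0 := by omega
      simp [hz, aLoop]
    · simp only [h0, if_neg, not_false_iff]
      rw [aLoop_eq_fLoop S.toList C C.length C.length 0 1 0 (by omega) rfl]
      have := fLoop_eq_bAns S.toList C C.length C.length 1
        (PySem.List.pyGetD C 0 0) [] [] (by omega)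
      simp only [List.foldl_nil, bAns] at this ⊢
      rw [← this]
      congr 1
      simp
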